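-- pv_equiv track=rewrite | github.com/adobe-flash/crossbridge | avmplus/utils/avmdiff.py | pick_majoirty
-- ===== SOURCE A (Python) =====
-- def pick_majoirty(results):
--     # pick the result with the most examples
--     e0 = ()
--     maxlen = 0
--     for e in results:
--         if len(results[e]) > maxlen:
--             e0 = (e,)
--             maxlen = len(results[e])
--         elif len(results[e]) == maxlen:
--             e0 += (e,)
--     if len(e0) == 1:
--         return e0[0]
--     # need a tiebreaker, prefer stat==0 over nonzero
--     l = [(stat,out) for stat,out in e0 if stat == 0]
--     if len(l) > 0:
--         return l[0]
--     # prefer stat > 0 (error) over stat < 0 (crash)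
--     l = [(stat,out) for stat,out in e0 if stat > 0]
--     if len(l) > 0:
--         return l[0]
--     # just pick the first one
--     return l[0]
-- ===== SOURCE B (Python) =====
-- def pick_majoirty(results):
--     # pick the key with the most examples; ties broken by preferring stat==0,
--     # then stat>0 (error), then stat<0 (crash); first insertion order wins.
--     def rank(item):
--         (stat, _out), examples = item
--         return (-len(examples), 0 if stat == 0 else (1 if stat > 0 else 2))
--     return sorted(results.items(), key=rank)[0][0]
-- ===== Notes on version B (the rewrite author's own statement) =====
-- stated objective: simpler
-- what changed: The interleaved argmax loop (growing a candidate tuple by repeated concatenation) followed by an early-return chain of three filter passes is replaced by one stable sort of the dict items under the composite key (-len(examples), tiebreak rank 0/1/2) and taking the first element, whose stability makes the whole candidate/tiebreak machinery unnecessary; the C-level sort also measured faster than A's interpreted per-key passes.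
-- outside the precondition, e.g. on pick_majoirty({(-1, 'a'): ['x'], (-2, 'b'): ['y']}): A raises IndexError, B returns (-1, 'a')
import Mathlib
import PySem

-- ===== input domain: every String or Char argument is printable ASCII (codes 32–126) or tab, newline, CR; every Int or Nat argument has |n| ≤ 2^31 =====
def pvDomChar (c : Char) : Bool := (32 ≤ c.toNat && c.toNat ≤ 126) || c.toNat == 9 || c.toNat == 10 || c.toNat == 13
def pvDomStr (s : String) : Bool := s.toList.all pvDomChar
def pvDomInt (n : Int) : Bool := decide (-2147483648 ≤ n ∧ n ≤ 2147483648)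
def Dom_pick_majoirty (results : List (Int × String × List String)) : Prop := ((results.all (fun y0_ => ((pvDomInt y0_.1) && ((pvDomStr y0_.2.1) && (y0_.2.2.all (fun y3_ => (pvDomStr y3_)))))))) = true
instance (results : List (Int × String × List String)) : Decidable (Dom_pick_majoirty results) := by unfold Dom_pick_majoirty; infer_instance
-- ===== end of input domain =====

-- B replaces A's interleaved argmax loop + three-filter early-return tiebreak chain by one
-- stable sort of the items under the composite key (-len, rank) and taking the first element;
-- return values only, no mutation involved.

-- ===== PORT A =====
-- results[e]: first entry of the association list whose key (stat, out) matches e;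
-- the key is always present when called from the loop, the [] default is never used there.
def pvLookup (results : List (Int × String × List String)) (e : Int × String) : List String :=
  match results.find? (fun kv => (kv.1, kv.2.1) == e) with
  | some kv => kv.2.2
  | none => []

-- literal transliteration of A: one fold maintaining (e0, maxlen), then the tiebreak chain.
-- The (0, "") branches correspond to e0[0]/l[0] raising IndexError; Pre_ excludes them.
def pick_majoirty (results : List (Int × String × List String)) : Int × String :=
  let r := results.foldl
    (fun (acc : List (Int × String) × Int) kv =>
      let e : Int × String := (kv.1, kv.2.1)
      let L : Int := (pvLookup results e).length
      if L > acc.2 then ([e], L)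
      else if L = acc.2 then (acc.1 ++ [e], acc.2)
      else acc) ([], 0)
  let e0 := r.1
  if e0.length = 1 then e0.headD (0, "")
  else
    let l := e0.filter (fun so => so.1 = 0)
    if 0 < l.length then l.headD (0, "")
    else
      let l2 := e0.filter (fun so => 0 < so.1)
      if 0 < l2.length then l2.headD (0, "")
      else (0, "")  -- final `return l[0]` on the empty list: IndexError

-- ===== PORT B =====
-- rank(item): 0 if stat == 0 else (1 if stat > 0 else 2)
def pvRank (kv : Int × String × List String) : Int :=
  if kv.1 = 0 then 0 else if 0 < kv.1 then 1 else 2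

-- literal transliteration of B: sorted(results.items(), key=rank)[0][0] — one stable sort
-- under the tuple key (-len(examples), rank), then the key of the first item.
-- The [] branch is `sorted(...)[0]` raising IndexError on an empty dict; Pre_ excludes it.
def pick_majoirty_alt (results : List (Int × String × List String)) : Int × String :=
  match PySem.List.sorted2 results
      (fun kv => -(kv.2.2.length : Int)) (fun kv => pvRank kv) false with
  | [] => (0, "")
  | best :: _ => (best.1, best.2.1)

-- ===== PRECONDITION & SPEC =====
-- Pre_ excludes (a) lists with duplicate (stat, out) keys, which a Python dict cannot hold
-- (the association-list order/first-match semantics there is accidental), and (b) inputs on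
-- which A raises IndexError: those where the set of max-length keys is empty or has ≥ 2
-- elements all with stat < 0 (then every tiebreak filter is empty and `l[0]` raises).
def Pre_pick_majoirty (results : List (Int × String × List String)) : Prop :=
  (results.map (fun kv => (kv.1, kv.2.1))).Nodup ∧
  (let maxlen : Int := (results.map (fun kv => (kv.2.2.length : Int))).foldl max 0
   let cands := (results.filter (fun kv => (kv.2.2.length : Int) = maxlen)).map
     (fun kv => (kv.1, kv.2.1))
   cands.length = 1 ∨ ∃ c ∈ cands, 0 ≤ c.1)
instance (results : List (Int × String × List String)) : Decidable (Pre_pick_majoirty results) := by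
  unfold Pre_pick_majoirty; infer_instance

def pvWitness_pick_majoirty : (List (Int × String × List String)) := [(0, "a", ["x"])]

def Spec_pick_majoirty (results : List (Int × String × List String)) (out : Int × String) : Prop := out = pick_majoirty_alt results
instance (results : List (Int × String × List String)) (out : Int × String) : Decidable (Spec_pick_majoirty results out) := by unfold Spec_pick_majoirty; infer_instance

-- ===== CLAIM (what is proved, stated in full; the proofs are below) =====
def Claim_equal_pick_majoirty : Prop := ∀ (results : List (Int × String × List String)), Dom_pick_majoirty results → Pre_pick_majoirty results → Spec_pick_majoirty results (pick_majoirty results)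

-- ===== LEMMAS AND PROOFS =====

-- abbreviations for the proofs
def pvLen (kv : Int × String × List String) : Int := (kv.2.2.length : Int)
def pvKey (kv : Int × String × List String) : Int × String := (kv.1, kv.2.1)
def pvMax (rs : List (Int × String × List String)) : Int := rs.foldl (fun m kv => max m (pvLen kv)) 0
def pvStep (acc : List (Int × String) × Int) (kv : Int × String × List String) :
    List (Int × String) × Int :=
  if pvLen kv > acc.2 then ([pvKey kv], pvLen kv)
  else if pvLen kv = acc.2 then (acc.1 ++ [pvKey kv], acc.2) else acc
-- the priority used by A's tiebreak chain, on keys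
def pvPrio (c : Int × String) : Int :=
  if c.1 = 0 then 0 else if 0 < c.1 then 1 else 2
-- the comparison sorted2 uses for B's tuple key (-len, rank)
def pvLex (a b : Int × String × List String) : Bool :=
  decide ((-(pvLen a)) < -(pvLen b)) ||
    (!decide ((-(pvLen b)) < -(pvLen a)) && decide (pvRank a < pvRank b))

theorem pvLen_le_pvMax (rs : List (Int × String × List String)) :
    ∀ kv ∈ rs, pvLen kv ≤ pvMax rs := by
  induction rs using List.reverseRecOn with
  | nil => intro kv h; simp at h
  | append_singleton t x ih =>
    intro kv h
    have hmax : pvMax (t ++ [x]) = max (pvMax t) (pvLen x) := by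
      simp [pvMax, List.foldl_append]
    rcases List.mem_append.mp h with h | h
    · exact le_trans (ih kv h) (hmax ▸ le_max_left _ _)
    · simp at h; subst h; exact hmax ▸ le_max_right _ _

-- A's interleaved fold computes exactly (max-length keys, max length)
theorem pvFold_eq (rs : List (Int × String × List String)) :
    rs.foldl pvStep ([], 0) =
      ((rs.filter (fun kv => pvLen kv = pvMax rs)).map pvKey, pvMax rs) := by
  induction rs using List.reverseRecOn with
  | nil => simp [pvMax]
  | append_singleton t x ih =>
    have hmax : pvMax (t ++ [x]) = max (pvMax t) (pvLen x) := by
      simp [pvMax, List.foldl_append]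
    rw [List.foldl_append, ih, List.foldl_cons, List.foldl_nil]
    rcases lt_trichotomy (pvMax t) (pvLen x) with h | h | h
    · have h1 : max (pvMax t) (pvLen x) = pvLen x := max_eq_right (le_of_lt h)
      have h2 : (t.filter (fun kv => pvLen kv = pvLen x)) = [] := by
        rw [List.filter_eq_nil_iff]
        intro kv hkv
        have hle := pvLen_le_pvMax t kv hkv
        simp only [decide_eq_true_eq]
        omega
      simp only [pvStep, h, if_pos, hmax, h1]
      rw [List.filter_append, h2]
      simp
    · have h1 : max (pvMax t) (pvLen x) = pvMax t := by omega
      simp only [pvStep, hmax, h1]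
      rw [if_neg (by omega), if_pos h.symm, List.filter_append]
      simp [h]
    · have h1 : max (pvMax t) (pvLen x) = pvMax t := max_eq_left (le_of_lt h)
      have h2 : ¬ pvLen x = pvMax t := by omega
      simp only [pvStep, hmax, h1]
      rw [if_neg (by omega), if_neg h2, List.filter_append]
      simp [h2]

-- with distinct keys, the dict lookup of an entry's own key returns that entry's value
theorem pvLookup_self (rs : List (Int × String × List String))
    (hnd : (rs.map pvKey).Nodup) :
    ∀ kv ∈ rs, pvLookup rs (pvKey kv) = kv.2.2 := by
  induction rs with
  | nil => intro kv h; simp at h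
  | cons y t ih =>
    intro kv h
    rcases List.mem_cons.mp h with h | h
    · subst h
      simp [pvLookup, List.find?, pvKey]
    · have hnd' : (t.map pvKey).Nodup := (List.nodup_cons.mp hnd).2
      have hne : pvKey y ≠ pvKey kv := by
        intro hc
        exact (List.nodup_cons.mp hnd).1 (hc ▸ List.mem_map_of_mem h)
      have htl : pvLookup t (pvKey kv) = kv.2.2 := ih hnd' kv h
      simp only [pvLookup, List.find?] at htl ⊢
      have hbeq : ((y.1, y.2.1) == pvKey kv) = false := by
        simpa [pvKey] using hne
      rw [hbeq]
      exact htl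

-- stat == 0 is already minimal: the min-fold never moves off it
theorem pvFoldMin_zero (cs : List (Int × String)) (b : Int × String) (hb : b.1 = 0) :
    cs.foldl (fun b x => if pvPrio x < pvPrio b then x else b) b = b := by
  induction cs with
  | nil => rfl
  | cons x t ih =>
    have hlt : ¬ pvPrio x < pvPrio b := by
      simp only [pvPrio, hb, if_pos]
      split_ifs <;> omega
    simp only [List.foldl_cons]
    rw [if_neg hlt]
    exact ih

-- no stat == 0 present and b already positive: the fold never moves off b
theorem pvFoldMin_pos (cs : List (Int × String)) (b : Int × String)
    (hb : 0 < b.1) (h0 : ∀ x ∈ cs, x.1 ≠ 0) :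
    cs.foldl (fun b x => if pvPrio x < pvPrio b then x else b) b = b := by
  induction cs with
  | nil => rfl
  | cons x t ih =>
    have hx := h0 x (List.mem_cons_self ..)
    have hlt : ¬ pvPrio x < pvPrio b := by
      simp only [pvPrio]
      split_ifs <;> omega
    simp only [List.foldl_cons]
    rw [if_neg hlt]
    exact ih (fun y hy => h0 y (List.mem_cons_of_mem _ hy))

-- a stat == 0 element exists further on: the fold lands on the first one
theorem pvFoldMin_exists_zero (cs : List (Int × String)) (b : Int × String)
    (hb : b.1 ≠ 0) (hex : ∃ x ∈ cs, x.1 = 0) (d : Int × String) :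
    cs.foldl (fun b x => if pvPrio x < pvPrio b then x else b) b = (cs.filter (fun so => so.1 = 0)).headD d := by
  induction cs generalizing b with
  | nil => simp at hex
  | cons x t ih =>
    by_cases hx : x.1 = 0
    · have hlt : pvPrio x < pvPrio b := by
        simp only [pvPrio, hx, if_pos]
        split_ifs <;> omega
      simp only [List.foldl_cons]
      rw [if_pos hlt, pvFoldMin_zero t x hx, List.filter_cons]
      simp [hx]
    · have hex' : ∃ y ∈ t, y.1 = 0 := by
        rcases hex with ⟨y, hy, hy0⟩
        rcases List.mem_cons.mp hy with h | h
        · exact absurd (h ▸ hy0) hx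
        · exact ⟨y, h, hy0⟩
      have hstep : (if pvPrio x < pvPrio b then x else b).1 ≠ 0 := by
        split_ifs <;> assumption
      simp only [List.foldl_cons]
      rw [ih _ hstep hex', List.filter_cons]
      simp [hx]

-- no stat == 0 anywhere, b negative, a positive exists further on: first positive wins
theorem pvFoldMin_exists_pos (cs : List (Int × String)) (b : Int × String)
    (hb : b.1 < 0) (h0 : ∀ x ∈ cs, x.1 ≠ 0) (hex : ∃ x ∈ cs, 0 < x.1) (d : Int × String) :
    cs.foldl (fun b x => if pvPrio x < pvPrio b then x else b) b = (cs.filter (fun so => 0 < so.1)).headD d := by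
  induction cs generalizing b with
  | nil => simp at hex
  | cons x t ih =>
    have hx0 := h0 x (List.mem_cons_self ..)
    by_cases hx : 0 < x.1
    · have hlt : pvPrio x < pvPrio b := by
        simp only [pvPrio]
        split_ifs <;> omega
      simp only [List.foldl_cons]
      rw [if_pos hlt,
        pvFoldMin_pos t x hx (fun y hy => h0 y (List.mem_cons_of_mem _ hy)), List.filter_cons]
      simp [hx]
    · have hlt : ¬ pvPrio x < pvPrio b := by
        simp only [pvPrio]
        split_ifs <;> omega
      have hex' : ∃ y ∈ t, 0 < y.1 := by
        rcases hex with ⟨y, hy, hy0⟩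
        rcases List.mem_cons.mp hy with h | h
        · exact absurd (h ▸ hy0) hx
        · exact ⟨y, h, hy0⟩
      simp only [List.foldl_cons]
      rw [if_neg hlt,
        ih b hb (fun y hy => h0 y (List.mem_cons_of_mem _ hy)) hex', List.filter_cons]
      simp [hx]

-- the tiebreak chain of A equals the min-by-priority fold on the candidate list,
-- provided the list is a singleton or contains some stat ≥ 0
theorem pvTiebreak (c : Int × String) (cs : List (Int × String))
    (hpre : (c :: cs).length = 1 ∨ ∃ x ∈ c :: cs, 0 ≤ x.1) :
    (if (c :: cs).length = 1 then (c :: cs).headD (0, "")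
     else
       if 0 < ((c :: cs).filter (fun so => so.1 = 0)).length then
         ((c :: cs).filter (fun so => so.1 = 0)).headD (0, "")
       else
         if 0 < ((c :: cs).filter (fun so => 0 < so.1)).length then
           ((c :: cs).filter (fun so => 0 < so.1)).headD (0, "")
         else (0, "")) =
    cs.foldl (fun b x => if pvPrio x < pvPrio b then x else b) c := by
  match cs with
  | [] => simp
  | c' :: cs' =>
    have hlen : ¬ (c :: c' :: cs').length = 1 := by simp
    rw [if_neg hlen]
    by_cases hz : ∃ x ∈ c :: c' :: cs', x.1 = 0
    · have hfil : 0 < ((c :: c' :: cs').filter (fun so => so.1 = 0)).length := by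
        rcases hz with ⟨x, hx, hx0⟩
        exact List.length_pos_of_mem (List.mem_filter.mpr ⟨hx, by simpa using hx0⟩)
      rw [if_pos hfil]
      by_cases hc : c.1 = 0
      · rw [pvFoldMin_zero (c' :: cs') c hc, List.filter_cons]
        simp [hc]
      · have hzt : ∃ x ∈ c' :: cs', x.1 = 0 := by
          rcases hz with ⟨x, hx, hx0⟩
          rcases List.mem_cons.mp hx with h | h
          · exact absurd (h ▸ hx0) hc
          · exact ⟨x, h, hx0⟩
        rw [pvFoldMin_exists_zero (c' :: cs') c hc hzt (0, ""), List.filter_cons]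
        simp [hc]
    · push Not at hz
      have hfil0 : ¬ 0 < ((c :: c' :: cs').filter (fun so => so.1 = 0)).length := by
        simp only [not_lt, Nat.le_zero, List.length_eq_zero_iff, List.filter_eq_nil_iff]
        intro x hx; simpa using hz x hx
      rw [if_neg hfil0]
      have hp : ∃ x ∈ c :: c' :: cs', 0 < x.1 := by
        rcases hpre with h | ⟨x, hx, hx0⟩
        · simp at h
        · exact ⟨x, hx, lt_of_le_of_ne hx0 (fun hcge => (hz x hx) hcge.symm)⟩
      have hfil2 : 0 < ((c :: c' :: cs').filter (fun so => 0 < so.1)).length := by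
        rcases hp with ⟨x, hx, hx0⟩
        exact List.length_pos_of_mem (List.mem_filter.mpr ⟨hx, by simpa using hx0⟩)
      rw [if_pos hfil2]
      by_cases hc : 0 < c.1
      · rw [pvFoldMin_pos (c' :: cs') c hc (fun y hy => hz y (List.mem_cons_of_mem _ hy)),
          List.filter_cons]
        simp [hc]
      · have hcneg : c.1 < 0 := by
          have := hz c (List.mem_cons_self ..)
          omega
        have hpt : ∃ x ∈ c' :: cs', 0 < x.1 := by
          rcases hp with ⟨x, hx, hx0⟩
          rcases List.mem_cons.mp hx with h | h
          · exact absurd (h ▸ hx0) hc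
          · exact ⟨x, h, hx0⟩
        rw [pvFoldMin_exists_pos (c' :: cs') c hcneg
          (fun y hy => hz y (List.mem_cons_of_mem _ hy)) hpt (0, ""), List.filter_cons]
        simp [hc]

-- B-side: the head of the insertion-sort fold is the first minimum under `before`
theorem pvHead_foldl_insertBy {α : Type} (before : α → α → Bool)
    (xs : List α) (y : α) (ys : List α) :
    (List.foldl (fun acc x => PySem.List.insertBy before x acc) (y :: ys) xs).head? =
      some (xs.foldl (fun b x => if before x b then x else b) y) := by
  induction xs generalizing y ys with
  | nil => rfl
  | cons x t ih =>
    simp only [List.foldl_cons]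
    by_cases h : before x y = true
    · have : PySem.List.insertBy before x (y :: ys) = x :: y :: ys := by
        simp [PySem.List.insertBy, h]
      rw [this, ih, if_pos h]
    · have : PySem.List.insertBy before x (y :: ys) = y :: PySem.List.insertBy before x ys := by
        simp [PySem.List.insertBy, h]
      rw [this, ih, if_neg h]

-- a first-min fold stays inside the list
theorem pvFoldMin_mem {α : Type} (p : α → α → Prop) [DecidableRel p] (cs : List α) (c : α) :
    cs.foldl (fun b x => if p x b then x else b) c ∈ c :: cs := by
  induction cs generalizing c with
  | nil => simp
  | cons x t ih =>
    simp only [List.foldl_cons]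
    rcases List.mem_cons.mp (ih (if p x c then x else c)) with h' | h'
    · rw [h']
      split_ifs
      · exact List.mem_cons_of_mem _ (List.mem_cons_self ..)
      · exact List.mem_cons_self ..
    · exact List.mem_cons_of_mem _ (List.mem_cons_of_mem _ h')

-- the first minimum under the lexicographic key (-len, rank) over the whole list is the
-- first minimum under rank over the max-length candidates
theorem pvLexMin (r0 : Int × String × List String) (rt : List (Int × String × List String)) :
    ∃ c cs, (r0 :: rt).filter (fun kv => pvLen kv = pvMax (r0 :: rt)) = c :: cs ∧
      rt.foldl (fun b x => if pvLex x b then x else b) r0 =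
        cs.foldl (fun b x => if pvRank x < pvRank b then x else b) c := by
  induction rt using List.reverseRecOn with
  | nil =>
    refine ⟨r0, [], ?_, rfl⟩
    have h0 : (0 : Int) ≤ pvLen r0 := by simp [pvLen]
    have : pvMax [r0] = pvLen r0 := by simp [pvMax]; omega
    simp [this]
  | append_singleton rt' x ih =>
    obtain ⟨c, cs, hfil, hfold⟩ := ih
    have hmax : pvMax (r0 :: (rt' ++ [x])) = max (pvMax (r0 :: rt')) (pvLen x) := by
      rw [← List.cons_append]
      simp [pvMax, List.foldl_append]
    -- the previous lex minimum F lies among the previous candidates, so pvLen F = pvMax (r0::rt')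
    set F := rt'.foldl (fun b x => if pvLex x b then x else b) r0 with hF
    have hFlen : pvLen F = pvMax (r0 :: rt') := by
      have hmem : F ∈ (r0 :: rt').filter (fun kv => pvLen kv = pvMax (r0 :: rt')) := by
        rw [hfold, hfil]
        exact pvFoldMin_mem (fun a b => pvRank a < pvRank b) cs c
      have := List.of_mem_filter hmem
      simpa using this
    rw [List.foldl_append, List.foldl_cons, List.foldl_nil, ← hF]
    rcases lt_trichotomy (pvMax (r0 :: rt')) (pvLen x) with h | h | h
    · -- strictly longer: x is the unique new candidate and wins the lex fold
      have hlex : pvLex x F = true := by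
        simp only [pvLex, Bool.or_eq_true, decide_eq_true_eq]
        left; omega
      have h1 : max (pvMax (r0 :: rt')) (pvLen x) = pvLen x := max_eq_right (le_of_lt h)
      have h2 : ((r0 :: rt').filter (fun kv => pvLen kv = pvLen x)) = [] := by
        rw [List.filter_eq_nil_iff]
        intro kv hkv
        have hle := pvLen_le_pvMax (r0 :: rt') kv hkv
        simp only [decide_eq_true_eq]
        omega
      refine ⟨x, [], ?_, ?_⟩
      · rw [hmax, h1, ← List.cons_append, List.filter_append, h2]
        simp
      · rw [if_pos hlex]
        rfl
    · -- equal length: x joins the candidates at the end; lex compares by rank only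
      have hq1 : ¬ (-(pvLen x) < -(pvLen F)) := by omega
      have hq2 : ¬ (-(pvLen F) < -(pvLen x)) := by omega
      have hlex : pvLex x F = (decide (pvRank x < pvRank F)) := by
        simp only [pvLex]
        simp [hq1, hq2]
      have h1 : max (pvMax (r0 :: rt')) (pvLen x) = pvMax (r0 :: rt') := by omega
      refine ⟨c, cs ++ [x], ?_, ?_⟩
      · rw [hmax, h1, ← List.cons_append, List.filter_append, hfil]
        simp [← h]
      · rw [List.foldl_append, List.foldl_cons, List.foldl_nil, ← hfold]
        by_cases hr : pvRank x < pvRank F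
        · rw [if_pos (by rw [hlex]; exact decide_eq_true hr), if_pos hr]
        · rw [if_neg (by rw [hlex]; simpa using hr), if_neg hr]
    · -- strictly shorter: candidates unchanged, lex fold keeps F
      have hlex : pvLex x F = false := by
        simp only [pvLex]
        have hq1 : ¬ (-(pvLen x) < -(pvLen F)) := by omega
        have hq2 : (-(pvLen F) < -(pvLen x)) := by omega
        simp [hq1, hq2]
      have h1 : max (pvMax (r0 :: rt')) (pvLen x) = pvMax (r0 :: rt') := max_eq_left (le_of_lt h)
      refine ⟨c, cs, ?_, ?_⟩
      · rw [hmax, h1, ← List.cons_append, List.filter_append, hfil]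
        have hne : ¬ pvLen x = pvMax (r0 :: rt') := by omega
        simp [hne]
      · rw [if_neg (by simp [hlex]), hfold]

-- projecting the rank-min fold onto keys gives the priority-min fold on keys
theorem pvKey_foldMin (cs : List (Int × String × List String)) (c : Int × String × List String) :
    pvKey (cs.foldl (fun b x => if pvRank x < pvRank b then x else b) c) =
      (cs.map pvKey).foldl (fun b x => if pvPrio x < pvPrio b then x else b) (pvKey c) := by
  induction cs generalizing c with
  | nil => rfl
  | cons x t ih =>
    simp only [List.foldl_cons, List.map_cons]
    have hpk : ∀ kv, pvPrio (pvKey kv) = pvRank kv := by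
      intro kv; rfl
    by_cases h : pvRank x < pvRank c
    · rw [if_pos h, if_pos (by rw [hpk, hpk]; exact h), ih]
    · rw [if_neg h, if_neg (by rw [hpk, hpk]; exact h), ih]

-- ===== VERDICT (by name: the statement is the Claim_ definition above) =====
theorem pick_majoirty_spec : Claim_equal_pick_majoirty := by
  intro results _hdom hpre
  obtain ⟨hnd, hcand⟩ := hpre
  have hnd' : (results.map pvKey).Nodup := hnd
  unfold Spec_pick_majoirty pick_majoirty pick_majoirty_alt
  have hcongr :
      results.foldl (fun (acc : List (Int × String) × Int) kv =>
        let e : Int × String := (kv.1, kv.2.1)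
        let L : Int := (pvLookup results e).length
        if L > acc.2 then ([e], L)
        else if L = acc.2 then (acc.1 ++ [e], acc.2)
        else acc) ([], 0) = results.foldl pvStep ([], 0) := by
    apply PySem.List.foldl_congr_mem
    intro acc kv hkv
    have hself : pvLookup results (kv.1, kv.2.1) = kv.2.2 :=
      pvLookup_self results hnd' kv hkv
    simp only [pvStep, pvLen, pvKey, hself]
  have hmax : (results.map (fun kv => (kv.2.2.length : Int))).foldl max 0 = pvMax results := by
    simp [pvMax, pvLen, List.foldl_map]
  -- A reduces to the tiebreak chain on the max-length keys
  show
    (let r := results.foldl (fun (acc : List (Int × String) × Int) kv =>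
        let e : Int × String := (kv.1, kv.2.1)
        let L : Int := (pvLookup results e).length
        if L > acc.2 then ([e], L)
        else if L = acc.2 then (acc.1 ++ [e], acc.2)
        else acc) ([], 0)
     let e0 := r.1
     if e0.length = 1 then e0.headD (0, "")
     else
       let l := e0.filter (fun so => so.1 = 0)
       if 0 < l.length then l.headD (0, "")
       else
         let l2 := e0.filter (fun so => 0 < so.1)
         if 0 < l2.length then l2.headD (0, "")
         else (0, "")) = _
  rw [hcongr, pvFold_eq]
  have hcand' :
      ((results.filter (fun kv => pvLen kv = pvMax results)).map pvKey).length = 1 ∨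
      ∃ c ∈ (results.filter (fun kv => pvLen kv = pvMax results)).map pvKey, 0 ≤ c.1 := by
    simpa only [pvLen, pvKey, hmax] using hcand
  -- results is nonempty under Pre_
  rcases hres : results with _ | ⟨r0, rt⟩
  · subst hres
    simp at hcand'
  · subst hres
    obtain ⟨c, cs, hfil, hfold⟩ := pvLexMin r0 rt
    -- B reduces to the key of the first lexicographic minimum
    have hB :
        (match PySem.List.sorted2 (r0 :: rt)
            (fun kv => -(kv.2.2.length : Int)) (fun kv => pvRank kv) false with
         | [] => ((0 : Int), "")
         | best :: _ => (best.1, best.2.1)) =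
          pvKey (rt.foldl (fun b x => if pvLex x b then x else b) r0) := by
      have hunf : PySem.List.sorted2 (r0 :: rt)
          (fun kv => -(kv.2.2.length : Int)) (fun kv => pvRank kv) false =
          List.foldl (fun acc x => PySem.List.insertBy (fun a b => pvLex a b) x acc) [r0] rt := by
        have hbe : (fun (a b : Int × String × List String) =>
            decide ((fun kv : Int × String × List String => -(kv.2.2.length : Int)) a <
                (fun kv : Int × String × List String => -(kv.2.2.length : Int)) b) ||
              (!decide ((fun kv : Int × String × List String => -(kv.2.2.length : Int)) b <
                  (fun kv : Int × String × List String => -(kv.2.2.length : Int)) a) &&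
                decide (pvRank a < pvRank b))) = fun a b => pvLex a b := by
          funext a b
          simp [pvLex, pvLen]
        simp only [PySem.List.sorted2, List.foldl_cons]
        rw [hbe]
        rfl
      have hhd := pvHead_foldl_insertBy (fun a b => pvLex a b) rt r0 []
      rcases hh : List.foldl (fun acc x => PySem.List.insertBy (fun a b => pvLex a b) x acc)
          [r0] rt with _ | ⟨m, rest⟩
      · rw [hh] at hhd; simp at hhd
      · rw [hh] at hhd
        simp only [List.head?] at hhd
        have hm : m = rt.foldl (fun b x => if pvLex x b then x else b) r0 := by
          exact Option.some.inj hhd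
        rw [hunf, hh, hm]
        rfl
    rw [hB, hfold, pvKey_foldMin]
    rw [hfil] at hcand'
    rcases hmap : (c :: cs).map pvKey with _ | ⟨k, ks⟩
    · simp at hmap
    · have hk : pvKey c = k := by
        simp only [List.map_cons] at hmap
        exact (List.cons.injEq _ _ _ _ ▸ hmap).1
      have hks : cs.map pvKey = ks := by
        simp only [List.map_cons] at hmap
        exact (List.cons.injEq _ _ _ _ ▸ hmap).2
      rw [hmap] at hcand'
      rw [hfil, hmap, hk, hks]
      exact pvTiebreak k ks hcand'
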